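-- pv_equiv track=rewrite | github.com/Med-Mounir-Moussa/Market-Data-Extraction-Transformer-reform | MarketScrapingBack/databaseHandeling/SiblingsTags.py | CoordinateOfLastSimilarity
-- ===== SOURCE A (Python) =====
-- def CoordinateOfLastSimilarity(xpath1, xpath2):
-- 	minLength = min(len(xpath1),len(xpath2))
-- 	lastSimilarityPos =0
-- 	preLastSimilarityPos =0
-- 	for i in range(0,minLength):
-- 		if(xpath1[i] == xpath2[i]):
-- 			if(xpath1[i]== '/'):
-- 				preLastSimilarityPos = lastSimilarityPos
-- 				lastSimilarityPos=i
-- 		else: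
-- 			return(preLastSimilarityPos, lastSimilarityPos)
-- 	return preLastSimilarityPos,lastSimilarityPos
-- ===== SOURCE B (Python) =====
-- def CoordinateOfLastSimilarity(xpath1, xpath2):
--     n = min(len(xpath1), len(xpath2))
--     k = 0
--     while k < n and xpath1[k] == xpath2[k]:
--         k += 1
--     last = xpath1.rfind('/', 0, k)
--     if last == -1:
--         return (0, 0)
--     pre = xpath1.rfind('/', 0, last)
--     return (max(pre, 0), last)
-- ===== Notes on version B (the rewrite author's own statement) =====
-- stated objective: idiomatic
-- what changed: B first computes the length of the common prefix, then finds the last two '/' positions with right-to-left str.rfind searches (mapping -1 to 0), instead of A's single fused forward scan that threads two slash-position accumulators.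
import Mathlib
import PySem

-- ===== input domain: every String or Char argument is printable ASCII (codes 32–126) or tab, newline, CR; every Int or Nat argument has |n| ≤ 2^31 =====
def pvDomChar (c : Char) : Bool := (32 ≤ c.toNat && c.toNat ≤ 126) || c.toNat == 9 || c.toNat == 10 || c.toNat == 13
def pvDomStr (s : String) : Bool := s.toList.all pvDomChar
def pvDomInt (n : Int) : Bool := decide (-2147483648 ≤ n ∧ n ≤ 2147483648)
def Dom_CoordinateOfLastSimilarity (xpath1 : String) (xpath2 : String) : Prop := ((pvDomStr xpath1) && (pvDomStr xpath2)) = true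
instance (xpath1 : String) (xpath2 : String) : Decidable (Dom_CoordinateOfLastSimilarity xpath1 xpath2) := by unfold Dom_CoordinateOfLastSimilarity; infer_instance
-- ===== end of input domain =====

-- B replaces A's fused forward scan by: common-prefix length, then two right-to-left rfind('/') searches (idiomatic).
-- ===== PORT A =====
-- A's for-loop: forward scan of both strings in lockstep, early return at the first mismatch,
-- carrying (preLastSimilarityPos, lastSimilarityPos) and the current index i.
def pvLoopA : List Char → List Char → Int → Int → Int → Int × Int
  | c1 :: t1, c2 :: t2, i, pre, last =>
      if c1 = c2 then
        if c1 = '/' then pvLoopA t1 t2 (i + 1) last i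
        else pvLoopA t1 t2 (i + 1) pre last
      else (pre, last)
  | _, _, _, pre, last => (pre, last)

def CoordinateOfLastSimilarity (xpath1 : String) (xpath2 : String) : Int × Int :=
  pvLoopA xpath1.toList xpath2.toList 0 0 0

-- ===== PORT B =====
-- Source B's while loop computing the common-prefix length k.
def pvCommonLen : List Char → List Char → Nat
  | c1 :: t1, c2 :: t2 => if c1 = c2 then pvCommonLen t1 t2 + 1 else 0
  | _, _ => 0

-- str.rfind('/', 0, len l) on a char list: index of the rightmost '/', -1 if none (right-to-left search).
def pvRFindSlash : List Char → Int
  | [] => -1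
  | c :: t =>
      let r := pvRFindSlash t
      if r ≠ -1 then r + 1 else if c = '/' then 0 else -1

def CoordinateOfLastSimilarity_alt (xpath1 : String) (xpath2 : String) : Int × Int :=
  let l1 := xpath1.toList
  let k := pvCommonLen l1 xpath2.toList
  let common := l1.take k
  let last := pvRFindSlash common
  if last = -1 then (0, 0)
  else
    let pre := pvRFindSlash (common.take last.toNat)
    (max pre 0, last)

-- ===== PRECONDITION & SPEC =====
def Spec_CoordinateOfLastSimilarity (xpath1 : String) (xpath2 : String) (out : Int × Int) : Prop := out = CoordinateOfLastSimilarity_alt xpath1 xpath2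
instance (xpath1 : String) (xpath2 : String) (out : Int × Int) : Decidable (Spec_CoordinateOfLastSimilarity xpath1 xpath2 out) := by unfold Spec_CoordinateOfLastSimilarity; infer_instance

-- ===== CLAIM (what is proved, stated in full; the proofs are below) =====
def Claim_equal_CoordinateOfLastSimilarity : Prop := ∀ (xpath1 : String) (xpath2 : String), Dom_CoordinateOfLastSimilarity xpath1 xpath2 → Spec_CoordinateOfLastSimilarity xpath1 xpath2 (CoordinateOfLastSimilarity xpath1 xpath2)

-- ===== LEMMAS AND PROOFS =====
theorem pvRFindSlash_nonneg (l : List Char) (h : pvRFindSlash l ≠ -1) : 0 ≤ pvRFindSlash l := by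
  induction l with
  | nil => simp [pvRFindSlash] at h
  | cons c t ih =>
      by_cases hr : pvRFindSlash t = -1
      · have h1 : pvRFindSlash (c :: t) = if c = '/' then 0 else -1 := by
          simp [pvRFindSlash, hr]
        rw [h1] at h ⊢
        by_cases hc : c = '/'
        · simp [hc]
        · simp [hc] at h
      · have h1 : pvRFindSlash (c :: t) = pvRFindSlash t + 1 := by
          simp [pvRFindSlash, hr]
        have := ih hr
        rw [h1]
        omega

-- the loop of A restricted to the (already equal) common-prefix characters
def pvG : List Char → Int → Int → Int → Int × Int
  | [], _, pre, last => (pre, last)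
  | c :: t, i, pre, last =>
      if c = '/' then pvG t (i + 1) last i else pvG t (i + 1) pre last

theorem pvLoopA_eq_pvG (l1 l2 : List Char) (i pre last : Int) :
    pvLoopA l1 l2 i pre last = pvG (l1.take (pvCommonLen l1 l2)) i pre last := by
  induction l1 generalizing l2 i pre last with
  | nil => cases l2 <;> simp [pvLoopA, pvCommonLen, pvG]
  | cons c1 t1 ih =>
      cases l2 with
      | nil => simp [pvLoopA, pvCommonLen, pvG]
      | cons c2 t2 =>
          by_cases h : c1 = c2
          · subst h
            by_cases hc : c1 = '/' <;>
              simp [pvLoopA, pvCommonLen, pvG, hc, List.take_succ_cons, ih]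
          · simp [pvLoopA, pvCommonLen, pvG, h]

theorem pvG_char (P : List Char) (i pre last : Int) :
    pvG P i pre last =
      if pvRFindSlash P = -1 then (pre, last)
      else
        ((if pvRFindSlash (P.take (pvRFindSlash P).toNat) = -1 then last
          else i + pvRFindSlash (P.take (pvRFindSlash P).toNat)),
         i + pvRFindSlash P) := by
  induction P generalizing i pre last with
  | nil => simp [pvG, pvRFindSlash]
  | cons c t ih =>
      by_cases hr : pvRFindSlash t = -1
      · by_cases hc : c = '/'
        · simp [pvG, pvRFindSlash, hr, hc, ih]
        · simp [pvG, pvRFindSlash, hr, hc, ih]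
      · have hpos : 0 ≤ pvRFindSlash t := pvRFindSlash_nonneg t hr
        have h1 : pvRFindSlash (c :: t) = pvRFindSlash t + 1 := by
          simp [pvRFindSlash, hr]
        have htoNat : (pvRFindSlash t + 1).toNat = (pvRFindSlash t).toNat + 1 := by omega
        have hcond : ¬ (pvRFindSlash t + 1 = -1) := by omega
        rw [show pvG (c :: t) i pre last
            = if c = '/' then pvG t (i + 1) last i else pvG t (i + 1) pre last from rfl,
          h1, if_neg hcond, htoNat, List.take_succ_cons]
        by_cases hr2 : pvRFindSlash (t.take (pvRFindSlash t).toNat) = -1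
        · by_cases hc : c = '/'
          · have hin : pvRFindSlash (c :: t.take (pvRFindSlash t).toNat) = 0 := by
              simp [pvRFindSlash, hr2, hc]
            rw [if_pos hc, ih, if_neg hr, if_pos hr2, hin]
            norm_num
            omega
          · have hin : pvRFindSlash (c :: t.take (pvRFindSlash t).toNat) = -1 := by
              simp [pvRFindSlash, hr2, hc]
            rw [if_neg hc, ih, if_neg hr, if_pos hr2, hin, if_pos rfl]
            simp [Prod.ext_iff]
            omega
        · have hpos2 : 0 ≤ pvRFindSlash (t.take (pvRFindSlash t).toNat) :=
            pvRFindSlash_nonneg _ hr2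
          have hin : pvRFindSlash (c :: t.take (pvRFindSlash t).toNat)
              = pvRFindSlash (t.take (pvRFindSlash t).toNat) + 1 := by
            simp [pvRFindSlash, hr2]
          have hincond : ¬ (pvRFindSlash (t.take (pvRFindSlash t).toNat) + 1 = -1) := by omega
          rw [hin, if_neg hincond]
          by_cases hc : c = '/'
          · rw [if_pos hc, ih, if_neg hr, if_neg hr2]
            simp [Prod.ext_iff]
            omega
          · rw [if_neg hc, ih, if_neg hr, if_neg hr2]
            simp [Prod.ext_iff]
            omega

-- ===== VERDICT (by name: the statement is the Claim_ definition above) =====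
theorem CoordinateOfLastSimilarity_spec : Claim_equal_CoordinateOfLastSimilarity := by
  intro x1 x2 _
  unfold Spec_CoordinateOfLastSimilarity CoordinateOfLastSimilarity CoordinateOfLastSimilarity_alt
  rw [pvLoopA_eq_pvG, pvG_char]
  by_cases h : pvRFindSlash (x1.toList.take (pvCommonLen x1.toList x2.toList)) = -1
  · simp [h]
  · have hpos : 0 ≤ pvRFindSlash (x1.toList.take (pvCommonLen x1.toList x2.toList)) :=
      pvRFindSlash_nonneg _ h
    simp only [h, if_false, zero_add]
    by_cases h2 : pvRFindSlash ((x1.toList.take (pvCommonLen x1.toList x2.toList)).take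
        (pvRFindSlash (x1.toList.take (pvCommonLen x1.toList x2.toList))).toNat) = -1
    · simp [h2]
    · have hpos2 := pvRFindSlash_nonneg _ h2
      simp [h2]
      omega
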